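-- pv_equiv track=rewrite | github.com/adhithyan15/coding-adventures | code/packages/python/mini-sqlite/src/mini_sqlite/connection.py | _first_keyword
-- ===== SOURCE A (Python) =====
-- def _first_keyword(sql: str) -> str:
--     """Extract the first identifier (uppercase) from a SQL string.
--
--     Skips leading whitespace and both ``--`` line comments and ``/* */``
--     block comments before extracting the word.  Used to sniff whether a
--     statement is DDL or a transaction-control statement (TCL) so the
--     connection can handle it specially.
--     """
--     i = 0
--     n = len(sql)
--     while i < n:
--         ch = sql[i]
--         if ch.isspace():
--             i += 1
--             continue
--         if ch == "-" and i + 1 < n and sql[i + 1] == "-":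
--             # Line comment — skip to end of line.
--             while i < n and sql[i] != "\n":
--                 i += 1
--             continue
--         if ch == "/" and i + 1 < n and sql[i + 1] == "*":
--             # Block comment — skip to matching close.
--             i += 2
--             while i + 1 < n and not (sql[i] == "*" and sql[i + 1] == "/"):
--                 i += 1
--             i = min(i + 2, n)
--             continue
--         break
--     word: list[str] = []
--     while i < n and sql[i].isalpha():
--         word.append(sql[i])
--         i += 1
--     return "".join(word).upper()
-- ===== SOURCE B (Python) =====
-- def _first_keyword(sql: str) -> str:
--     """Suffix-slicing rewrite: lstrip + startswith/find instead of a hand-run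
--     index cursor; same result, plainer code."""
--     s = sql.lstrip()
--     while True:
--         if s.startswith("--"):
--             nl = s.find("\n")
--             if nl < 0:
--                 s = ""
--                 break
--             s = s[nl:].lstrip()
--         elif s.startswith("/*"):
--             end = s.find("*/", 2)
--             if end < 0:
--                 s = ""
--                 break
--             s = s[end + 2:].lstrip()
--         else:
--             break
--     word = []
--     for ch in s:
--         if not ch.isalpha():
--             break
--         word.append(ch)
--     return "".join(word).upper()
-- ===== Notes on version B (the rewrite author's own statement) =====
-- stated objective: idiomatic
-- what changed: Replaces A's hand-run integer cursor with inner index loops by suffix slicing: lstrip() to drop whitespace, startswith()/find() to locate and cut off each comment, then a simple collect of the leading alphabetic word (C-level built-ins do the scanning).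
import Mathlib
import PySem

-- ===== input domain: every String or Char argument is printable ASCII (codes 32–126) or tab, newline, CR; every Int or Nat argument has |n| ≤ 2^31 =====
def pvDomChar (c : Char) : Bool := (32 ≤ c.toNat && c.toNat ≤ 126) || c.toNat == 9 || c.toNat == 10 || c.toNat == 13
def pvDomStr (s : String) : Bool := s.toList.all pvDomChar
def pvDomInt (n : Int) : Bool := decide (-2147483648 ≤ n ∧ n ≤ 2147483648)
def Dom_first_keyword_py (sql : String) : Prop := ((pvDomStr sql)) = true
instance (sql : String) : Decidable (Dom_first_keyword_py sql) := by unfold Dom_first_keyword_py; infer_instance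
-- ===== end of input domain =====

-- B rewrites the comment/whitespace skipping with lstrip/startswith/find suffix slicing instead of A's integer cursor; same result (objective: idiomatic).

-- ===== PORT A =====
-- inner `while i < n and sql[i] != '\n'` of the line-comment branch
def aLine (cs : List Char) (i : Nat) : Nat :=
  if _h : i < cs.length ∧ cs.getD i ' ' ≠ '\n' then aLine cs (i + 1) else i
termination_by cs.length - i

-- inner `while i + 1 < n and not (sql[i] == '*' and sql[i+1] == '/')`
def aBlock (cs : List Char) (i : Nat) : Nat :=
  if _h : i + 1 < cs.length ∧ ¬(cs.getD i ' ' = '*' ∧ cs.getD (i + 1) ' ' = '/') then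
    aBlock cs (i + 1)
  else i
termination_by cs.length - i

theorem aLine_ge (cs : List Char) (i : Nat) : i ≤ aLine cs i := by
  fun_induction aLine <;> omega

theorem aBlock_ge (cs : List Char) (i : Nat) : i ≤ aBlock cs i := by
  fun_induction aBlock <;> omega

-- the outer `while i < n: …` skipping loop; state is the cursor i, as in A
def aSkip (cs : List Char) (i : Nat) : Nat :=
  if h : i < cs.length then
    if _hs : PySem.Chars.isspace (cs.getD i ' ') then aSkip cs (i + 1)
    else if hl : cs.getD i ' ' = '-' ∧ i + 1 < cs.length ∧ cs.getD (i + 1) ' ' = '-' then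
      aSkip cs (aLine cs i)
    else if hb : cs.getD i ' ' = '/' ∧ i + 1 < cs.length ∧ cs.getD (i + 1) ' ' = '*' then
      aSkip cs (min (aBlock cs (i + 2) + 2) cs.length)
    else i
  else i
termination_by cs.length - i
decreasing_by
  · omega
  · have h1 : aLine cs i = aLine cs (i + 1) := by
      rw [aLine, dif_pos ⟨h, by rw [hl.1]; decide⟩]
    have h2 := aLine_ge cs (i + 1)
    omega
  · have h2 := aBlock_ge cs (i + 2)
    omega

-- `word` collection loop: `while i < n and sql[i].isalpha(): word.append(sql[i]); i += 1`
def aWord (cs : List Char) (i : Nat) (acc : List Char) : List Char :=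
  if _h : i < cs.length ∧ PySem.Chars.isalpha (cs.getD i ' ') then
    aWord cs (i + 1) (acc ++ [cs.getD i ' '])
  else acc
termination_by cs.length - i

def first_keyword_py (sql : String) : String :=
  PySem.Str.upper (String.mk (aWord sql.toList (aSkip sql.toList 0) []))

-- ===== PORT B =====
-- a small fact cited by bLoop's termination proof
theorem prefix_two_cons {a b : Char} {t : List Char} (h : [a, b] <+: t) :
    ∃ u, t = a :: b :: u := by
  obtain ⟨u, rfl⟩ := h; exact ⟨u, rfl⟩

-- the `while True:` comment-skipping loop over the remaining suffix s
def bLoop (s : List Char) : List Char :=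
  if h1 : PySem.Chars.startswith s ['-', '-'] = true then
    if h2 : PySem.Chars.find s ['\n'] < 0 then []
    else bLoop (PySem.Chars.lstrip (s.drop (PySem.Chars.find s ['\n']).toNat))
  else if h3 : PySem.Chars.startswith s ['/', '*'] = true then
    if h4 : PySem.Chars.findFrom s ['*', '/'] 2 none < 0 then []
    else bLoop (PySem.Chars.lstrip (s.drop ((PySem.Chars.findFrom s ['*', '/'] 2 none).toNat + 2)))
  else s
termination_by s.length
decreasing_by
  · -- line comment: the newline is at index ≥ 1 since s starts with '-'
    have hnn : (0 : Int) ≤ PySem.Chars.find s ['\n'] := by omega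
    have hspec := PySem.Chars.find_spec (s := s) (sub := ['\n']) hnn
    obtain ⟨u, hu⟩ := prefix_two_cons ((PySem.Chars.startswith_iff _ _).mp h1)
    have hpos : (PySem.Chars.find s ['\n']).toNat ≠ 0 := by
      intro h0
      rw [h0] at hspec
      obtain ⟨v, hv⟩ := hspec.1
      simp only [List.drop_zero] at hv
      rw [hu] at hv
      simp at hv
    have hlen : s.length ≠ 0 := by rw [hu]; simp
    have hd := List.length_dropWhile_le (p := PySem.Chars.isspace)
      (l := s.drop (PySem.Chars.find s ['\n']).toNat)
    simp only [PySem.Chars.lstrip] at *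
    have := List.length_drop (l := s) (i := (PySem.Chars.find s ['\n']).toNat)
    omega
  · -- block comment: drop at least 2 characters of a string of length ≥ 2
    obtain ⟨u, hu⟩ := prefix_two_cons ((PySem.Chars.startswith_iff _ _).mp h3)
    have hlen : s.length ≠ 0 := by rw [hu]; simp
    have hd := List.length_dropWhile_le (p := PySem.Chars.isspace)
      (l := s.drop ((PySem.Chars.findFrom s ['*', '/'] 2 none).toNat + 2))
    simp only [PySem.Chars.lstrip] at *
    have := List.length_drop (l := s)
      (i := (PySem.Chars.findFrom s ['*', '/'] 2 none).toNat + 2)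
    omega

-- `for ch in s: if not ch.isalpha(): break; word.append(ch)`
def bWord : List Char → List Char
  | [] => []
  | ch :: tl => if PySem.Chars.isalpha ch then ch :: bWord tl else []

def first_keyword_py_alt (sql : String) : String :=
  PySem.Str.upper (String.mk (bWord (bLoop (PySem.Chars.lstrip sql.toList))))

-- ===== PRECONDITION & SPEC =====
def Spec_first_keyword_py (sql : String) (out : String) : Prop := out = first_keyword_py_alt sql
instance (sql : String) (out : String) : Decidable (Spec_first_keyword_py sql out) := by unfold Spec_first_keyword_py; infer_instance

-- ===== CLAIM (what is proved, stated in full; the proofs are below) =====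
def Claim_equal_first_keyword_py : Prop := ∀ (sql : String), Dom_first_keyword_py sql → Spec_first_keyword_py sql (first_keyword_py sql)

-- ===== LEMMAS AND PROOFS =====

theorem aWord_eq (cs : List Char) (i : Nat) (acc : List Char) :
    aWord cs i acc = acc ++ bWord (cs.drop i) := by
  fun_induction aWord with
  | case1 i acc h ih =>
    have hg : cs.getD i ' ' = cs[i] := List.getD_eq_getElem cs ' ' h.1
    have ha : PySem.Chars.isalpha cs[i] = true := hg ▸ h.2
    rw [ih, hg, List.drop_eq_getElem_cons h.1]
    simp [bWord, ha]
  | case2 i acc h =>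
    by_cases hn : i < cs.length
    · have hg : cs.getD i ' ' = cs[i] := List.getD_eq_getElem cs ' ' hn
      have ha : PySem.Chars.isalpha cs[i] = false := by
        rcases Bool.eq_false_or_eq_true (PySem.Chars.isalpha cs[i]) with h' | h'
        · exact absurd ⟨hn, hg ▸ h'⟩ h
        · exact h'
      rw [List.drop_eq_getElem_cons hn]
      simp [bWord, ha]
    · rw [List.drop_eq_nil_iff.mpr (by omega)]
      simp [bWord]

theorem aLine_drop (cs : List Char) (i : Nat) :
    cs.drop (aLine cs i) = (cs.drop i).dropWhile (fun c => !(c == '\n')) := by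
  fun_induction aLine with
  | case1 i h ih =>
    have hg : cs.getD i ' ' = cs[i] := List.getD_eq_getElem cs ' ' h.1
    have hb : (cs[i] == '\n') = false := beq_eq_false_iff_ne.mpr (hg ▸ h.2)
    rw [ih, List.drop_eq_getElem_cons h.1]
    simp [List.dropWhile, hb]
  | case2 i h =>
    by_cases hn : i < cs.length
    · have he : cs.getD i ' ' = '\n' := by
        by_contra hc; exact h ⟨hn, hc⟩
      rw [List.getD_eq_getElem cs ' ' hn] at he
      have hb : (cs[i] == '\n') = true := beq_iff_eq.mpr he
      rw [List.drop_eq_getElem_cons hn]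
      simp [List.dropWhile, hb]
    · rw [List.drop_eq_nil_iff.mpr (by omega)]
      simp

-- a first occurrence (no earlier one, one at k) coincides with dropWhile
theorem drop_eq_dropWhile_of_first {c : Char} :
    ∀ (t : List Char) (k : Nat), (∀ i, i < k → ¬ [c] <+: t.drop i) → [c] <+: t.drop k →
    t.drop k = t.dropWhile (fun x => !(x == c)) := by
  intro t
  induction t with
  | nil =>
    intro k _ hat
    obtain ⟨u, hu⟩ := hat
    simp at hu
  | cons a tl ih =>
    intro k hbefore hat
    cases k with
    | zero =>
      obtain ⟨u, hu⟩ := hat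
      simp only [List.drop_zero] at hu ⊢
      cases hu
      simp [List.dropWhile]
    | succ j =>
      have ha : a ≠ c := by
        intro rfl'
        exact hbefore 0 (by omega) ⟨tl, by simp [rfl']⟩
      have hb : (a == c) = false := beq_eq_false_iff_ne.mpr ha
      have := ih j (fun i hi => hbefore (i + 1) (by omega)) hat
      simp only [List.drop_succ_cons] at *
      rw [this]
      simp [List.dropWhile, hb]

-- first occurrence of a single character, as a dropWhile
theorem drop_findIdx_single (t : List Char) (c : Char) :
    (if PySem.Chars.find t [c] < 0 then ([] : List Char)
     else t.drop (PySem.Chars.find t [c]).toNat) = t.dropWhile (fun x => !(x == c)) := by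
  by_cases hf : PySem.Chars.find t [c] < 0
  · have heq : PySem.Chars.find t [c] = -1 := by
      have := PySem.Chars.neg_one_le_find (s := t) (sub := [c]); omega
    have hno : ¬ [c] <:+: t := (PySem.Chars.find_eq_neg_one_iff _ _).mp heq
    have hcm : c ∉ t := by
      intro hm
      obtain ⟨s1, s2, rfl⟩ := List.append_of_mem hm
      exact hno ⟨s1, s2, by simp⟩
    simp only [hf, if_true]
    symm
    rw [List.dropWhile_eq_nil_iff]
    intro x hx
    simp only [Bool.not_eq_eq_eq_not, Bool.not_true, beq_eq_false_iff_ne, ne_eq]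
    rintro rfl
    exact hcm hx
  · have hnn : (0 : Int) ≤ PySem.Chars.find t [c] := by omega
    have hspec := PySem.Chars.find_spec (s := t) (sub := [c]) hnn
    simp only [hf, if_false]
    exact drop_eq_dropWhile_of_first t _ (fun i hi => hspec.2 i hi) hspec.1

-- "the two-character comment delimiter starts at absolute position m"
def pairAt (cs : List Char) (p q : Char) (m : Nat) : Prop := [p, q] <+: cs.drop m

theorem pairAt_iff (cs : List Char) (p q : Char) (m : Nat) :
    pairAt cs p q m ↔ m + 1 < cs.length ∧ cs.getD m ' ' = p ∧ cs.getD (m + 1) ' ' = q := by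
  constructor
  · intro h
    obtain ⟨u, hu⟩ := h
    have hlen : m + 1 < cs.length := by
      have := congrArg List.length hu
      simp [List.length_drop] at this
      omega
    have h0 : cs.drop m = p :: q :: u := hu.symm
    have hm : m < cs.length := by omega
    rw [List.drop_eq_getElem_cons hm, List.drop_eq_getElem_cons hlen] at h0
    refine ⟨hlen, ?_, ?_⟩
    · rw [List.getD_eq_getElem cs ' ' hm]; exact (List.cons.injEq _ _ _ _ ▸ h0).1
    · rw [List.getD_eq_getElem cs ' ' hlen]
      have := (List.cons.injEq _ _ _ _ ▸ h0).2
      exact (List.cons.injEq _ _ _ _ ▸ this).1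
  · rintro ⟨hlen, hp, hq⟩
    have hm : m < cs.length := by omega
    refine ⟨cs.drop (m + 2), ?_⟩
    rw [List.drop_eq_getElem_cons hm, List.drop_eq_getElem_cons hlen]
    rw [List.getD_eq_getElem cs ' ' hm] at hp
    rw [List.getD_eq_getElem cs ' ' hlen] at hq
    simp [hp, hq]

theorem aBlock_spec (cs : List Char) (j : Nat) :
    (∀ m, j ≤ m → m < aBlock cs j → ¬ pairAt cs '*' '/' m) ∧
    (pairAt cs '*' '/' (aBlock cs j) ∨ cs.length ≤ aBlock cs j + 1) := by
  fun_induction aBlock with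
  | case1 j h ih =>
    refine ⟨?_, ih.2⟩
    intro m hjm hlt
    rcases Nat.eq_or_lt_of_le hjm with rfl | hlt'
    · rw [pairAt_iff]
      rintro ⟨hl, hp, hq⟩
      exact h.2 ⟨hp, hq⟩
    · exact ih.1 m hlt' hlt
  | case2 j h =>
    refine ⟨fun m h1 h2 => absurd (lt_of_le_of_lt h1 h2) (lt_irrefl j), ?_⟩
    by_cases hj : j + 1 < cs.length
    · left
      rw [pairAt_iff]
      have : cs.getD j ' ' = '*' ∧ cs.getD (j + 1) ' ' = '/' := by
        by_contra hc; exact h ⟨hj, hc⟩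
      exact ⟨hj, this.1, this.2⟩
    · right; omega

-- the whole block-comment branch of A: cursor after `i = min(i+2, n)` as a suffix
theorem aBlock_min_drop (cs : List Char) (j : Nat) :
    cs.drop (min (aBlock cs j + 2) cs.length) =
      (if PySem.Chars.find (cs.drop j) ['*', '/'] < 0 then ([] : List Char)
       else (cs.drop j).drop ((PySem.Chars.find (cs.drop j) ['*', '/']).toNat + 2)) := by
  have hge := aBlock_ge cs j
  obtain ⟨hmin, hstop⟩ := aBlock_spec cs j
  by_cases hf : PySem.Chars.find (cs.drop j) ['*', '/'] < 0
  · have heq : PySem.Chars.find (cs.drop j) ['*', '/'] = -1 := by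
      have := PySem.Chars.neg_one_le_find (s := cs.drop j) (sub := ['*', '/']); omega
    have hno : ¬ ['*', '/'] <:+: cs.drop j := (PySem.Chars.find_eq_neg_one_iff _ _).mp heq
    have hnoP : ∀ m, j ≤ m → ¬ pairAt cs '*' '/' m := by
      intro m hm hP
      apply hno
      rw [← (PySem.Chars.isIn_iff_infix _ _), ← PySem.Chars.exists_prefix_drop_iff_isIn]
      refine ⟨m - j, ?_⟩
      rw [List.drop_drop]
      have hjm' : j + (m - j) = m := by omega
      rw [hjm']
      exact hP
    have hend : cs.length ≤ aBlock cs j + 1 := by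
      rcases hstop with hP | hend
      · exact absurd hP (hnoP _ hge)
      · exact hend
    rw [if_pos hf]
    have : min (aBlock cs j + 2) cs.length = cs.length := by omega
    rw [this, List.drop_length]
  · have hnn : (0 : Int) ≤ PySem.Chars.find (cs.drop j) ['*', '/'] := by omega
    obtain ⟨hat, hbef⟩ := PySem.Chars.find_spec (s := cs.drop j) (sub := ['*', '/']) hnn
    set e := (PySem.Chars.find (cs.drop j) ['*', '/']).toNat with he
    have hatP : pairAt cs '*' '/' (j + e) := by
      unfold pairAt
      rw [show j + e = j + e from rfl, ← List.drop_drop]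
      exact hat
    have hlenP : j + e + 2 ≤ cs.length := by
      have := (pairAt_iff cs '*' '/' (j + e)).mp hatP
      omega
    have hA : aBlock cs j = j + e := by
      have hle : aBlock cs j ≤ j + e := by
        by_contra hc
        exact hmin (j + e) (by omega) (by omega) hatP
      rcases hstop with hP | hend
      · -- pair at aBlock; find-minimality forces aBlock - j ≥ e
        have : ¬ aBlock cs j < j + e := by
          intro hlt
          apply hbef (aBlock cs j - j)
          · omega
          · rw [List.drop_drop]
            have hab : j + (aBlock cs j - j) = aBlock cs j := by omega
            rw [hab]
            exact hP
        omega
      · omega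
    rw [if_neg hf]
    have hmin2 : min (aBlock cs j + 2) cs.length = j + e + 2 := by omega
    rw [hmin2, List.drop_drop, show j + (e + 2) = j + e + 2 from by omega]
  
theorem lstrip_eq (s : List Char) : PySem.Chars.lstrip s = s.dropWhile PySem.Chars.isspace := rfl

theorem lstrip_nil : PySem.Chars.lstrip ([] : List Char) = [] := rfl

theorem bLoop_nil : bLoop ([] : List Char) = [] := by
  rw [bLoop, dif_neg (by decide), dif_neg (by decide)]

theorem lstrip_drop_of_head (cs : List Char) (i : Nat) (h : i < cs.length)
    (hns : PySem.Chars.isspace (cs.getD i ' ') = false) :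
    PySem.Chars.lstrip (cs.drop i) = cs.drop i := by
  rw [lstrip_eq, List.drop_eq_getElem_cons h]
  rw [List.getD_eq_getElem cs ' ' h] at hns
  simp [List.dropWhile, hns]

theorem startswith_pair_false (cs : List Char) (i : Nat) (p q : Char)
    (h : ¬ (cs.getD i ' ' = p ∧ i + 1 < cs.length ∧ cs.getD (i + 1) ' ' = q)) :
    PySem.Chars.startswith (cs.drop i) [p, q] = false := by
  by_contra hc
  have hb' : PySem.Chars.startswith (cs.drop i) [p, q] = true := by simpa using hc
  have hp := (pairAt_iff cs p q i).mp ((PySem.Chars.startswith_iff _ _).mp hb')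
  exact h ⟨hp.2.1, hp.1, hp.2.2⟩

theorem main_lemma (cs : List Char) (i : Nat) :
    cs.drop (aSkip cs i) = bLoop (PySem.Chars.lstrip (cs.drop i)) := by
  fun_induction aSkip with
  | case1 i h hs ih =>
    rw [ih]
    congr 1
    rw [lstrip_eq, lstrip_eq, List.drop_eq_getElem_cons h]
    have hsp : PySem.Chars.isspace cs[i] = true := (List.getD_eq_getElem cs ' ' h) ▸ hs
    simp [List.dropWhile, hsp]
  | case2 i h hs hl ih =>
    have hsw : PySem.Chars.startswith (cs.drop i) ['-', '-'] = true :=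
      (PySem.Chars.startswith_iff _ _).mpr ((pairAt_iff cs '-' '-' i).mpr ⟨hl.2.1, hl.1, hl.2.2⟩)
    rw [lstrip_drop_of_head cs i h (by simpa using hs), bLoop, dif_pos hsw]
    have hdw := drop_findIdx_single (cs.drop i) '\n'
    by_cases hnl : PySem.Chars.find (cs.drop i) ['\n'] < 0
    · rw [dif_pos hnl]
      rw [if_pos hnl] at hdw
      have hempty : cs.drop (aLine cs i) = [] := by rw [aLine_drop, ← hdw]
      rw [ih, hempty, lstrip_nil, bLoop_nil]
    · rw [dif_neg hnl]
      rw [if_neg hnl] at hdw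
      rw [ih, aLine_drop, ← hdw]
  | case3 i h hs hl hb ih =>
    have hsw1 : PySem.Chars.startswith (cs.drop i) ['-', '-'] = false :=
      startswith_pair_false cs i '-' '-' hl
    have hsw2 : PySem.Chars.startswith (cs.drop i) ['/', '*'] = true :=
      (PySem.Chars.startswith_iff _ _).mpr ((pairAt_iff cs '/' '*' i).mpr ⟨hb.2.1, hb.1, hb.2.2⟩)
    rw [lstrip_drop_of_head cs i h (by simpa using hs), bLoop,
      dif_neg (by rw [hsw1]; simp), dif_pos hsw2]
    have h2len : 2 ≤ (cs.drop i).length := by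
      have := hb.2.1
      rw [List.length_drop]
      omega
    have hFF := PySem.Chars.findFrom_natCast (cs.drop i) ['*', '/'] 2 h2len
    have hdd2 : (cs.drop i).drop 2 = cs.drop (i + 2) := by rw [List.drop_drop]
    have hmd := aBlock_min_drop cs (i + 2)
    rw [hdd2] at hFF
    by_cases hfneg : PySem.Chars.find (cs.drop (i + 2)) ['*', '/'] = -1
    · have hFFv : PySem.Chars.findFrom (cs.drop i) ['*', '/'] 2 none = -1 := by
        rw [show ((2 : Int)) = ((2 : Nat) : Int) from rfl, hFF, if_pos hfneg]
      rw [dif_pos (by rw [hFFv]; decide)]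
      rw [if_pos (show PySem.Chars.find (cs.drop (i + 2)) ['*', '/'] < 0 by omega)] at hmd
      rw [ih, hmd, lstrip_nil, bLoop_nil]
    · have hflt : ¬ PySem.Chars.find (cs.drop (i + 2)) ['*', '/'] < 0 := by
        have := PySem.Chars.neg_one_le_find (s := cs.drop (i + 2)) (sub := ['*', '/'])
        omega
      have hFFv : PySem.Chars.findFrom (cs.drop i) ['*', '/'] 2 none =
          2 + PySem.Chars.find (cs.drop (i + 2)) ['*', '/'] := by
        rw [show ((2 : Int)) = ((2 : Nat) : Int) from rfl, hFF, if_neg hfneg]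
      have hffpos : ¬ PySem.Chars.findFrom (cs.drop i) ['*', '/'] 2 none < 0 := by
        rw [hFFv]; omega
      rw [dif_neg hffpos]
      rw [if_neg hflt] at hmd
      have ht : (2 + PySem.Chars.find (cs.drop (i + 2)) ['*', '/']).toNat + 2 =
          2 + ((PySem.Chars.find (cs.drop (i + 2)) ['*', '/']).toNat + 2) := by omega
      have harg : (cs.drop (i + 2)).drop ((PySem.Chars.find (cs.drop (i + 2)) ['*', '/']).toNat + 2) =
          (cs.drop i).drop ((PySem.Chars.findFrom (cs.drop i) ['*', '/'] 2 none).toNat + 2) := by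
        rw [hFFv, ht, ← hdd2, List.drop_drop]
      rw [ih, hmd, harg]
  | case4 i h hs hl hb =>
    rw [lstrip_drop_of_head cs i h (by simpa using hs), bLoop,
      dif_neg (by rw [startswith_pair_false cs i '-' '-' hl]; simp),
      dif_neg (by rw [startswith_pair_false cs i '/' '*' hb]; simp)]
  | case5 i h =>
    have hnil : cs.drop i = [] := List.drop_eq_nil_iff.mpr (by omega)
    rw [hnil, lstrip_nil, bLoop_nil]

-- ===== VERDICT (by name: the statement is the Claim_ definition above) =====
theorem first_keyword_py_spec : Claim_equal_first_keyword_py := by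
  intro sql _
  unfold Spec_first_keyword_py first_keyword_py first_keyword_py_alt
  rw [aWord_eq, main_lemma]
  simp
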